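-- pv_equiv track=rewrite | github.com/oxdz/ccdl | src/ccdl/binb_v016452.py | ctbl_ptbl
-- ===== SOURCE A (Python) =====
-- def ctbl_ptbl(t, ctbl_d, ptbl_d):
--     r"""
--     :param t: t="pages/BouPrlub.jpg"
--     :param ctbl_d: ctbl(decoded), list
--     :param ptbl_d: ptbl(decoded), list
--     """
--     i = [0, 0]
--     if(t):
--         n = t.index('/') + 1
--         r = len(t) - n
--         for e in range(r):
--             i[e % 2] += ord(t[e+n])
--         i[0] %= 8
--         i[1] %= 8
--     h = ctbl_d[i[1]]
--     s = ptbl_d[i[0]]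
--     return h, s
-- ===== SOURCE B (Python) =====
-- def ctbl_ptbl(t, ctbl_d, ptbl_d):
--     even = odd = 0
--     if t:
--         for c in reversed(t[t.index('/') + 1:]):
--             even, odd = odd + ord(c), even
--         even %= 8
--         odd %= 8
--     return ctbl_d[odd], ptbl_d[even]
-- ===== Notes on version B (the rewrite author's own statement) =====
-- stated objective: simpler
-- what changed: B walks the part after the first '/' back-to-front with a swapping accumulator pair (even, odd = odd + ord(c), even) instead of A's forward index loop dispatching each character via i[e % 2]; no parity test or index arithmetic remains, at the cost of a proof that the reversed swap-fold yields the even/odd position sums.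
import Mathlib
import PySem

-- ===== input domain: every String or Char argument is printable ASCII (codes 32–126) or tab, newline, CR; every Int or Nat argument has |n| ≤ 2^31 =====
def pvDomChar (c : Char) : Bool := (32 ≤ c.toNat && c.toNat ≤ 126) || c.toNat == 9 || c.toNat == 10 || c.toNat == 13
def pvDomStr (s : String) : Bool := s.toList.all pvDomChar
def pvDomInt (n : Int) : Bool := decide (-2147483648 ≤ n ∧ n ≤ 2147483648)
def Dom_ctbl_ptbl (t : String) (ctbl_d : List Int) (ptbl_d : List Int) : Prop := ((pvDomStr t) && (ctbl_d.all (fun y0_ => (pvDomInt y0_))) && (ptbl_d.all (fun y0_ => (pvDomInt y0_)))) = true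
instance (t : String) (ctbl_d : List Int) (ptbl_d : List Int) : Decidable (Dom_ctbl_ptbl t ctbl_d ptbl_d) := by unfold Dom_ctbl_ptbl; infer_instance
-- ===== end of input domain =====

-- B traverses the part after the first '/' back-to-front with a swapping accumulator pair,
-- replacing A's forward index loop with the parity dispatch i[e % 2]; same return value on Pre_.

-- ===== PORT A =====
-- literal port of A: i = [0,0] is the pair, the for-loop over range(r) is a foldl over pyRange,
-- i[e % 2] += ord(t[e+n]) is the parity-dispatched branch (t[e+n] via pyGetD, always in range here)
def ctbl_ptbl (t : String) (ctbl_d : List Int) (ptbl_d : List Int) : Int × Int :=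
  let i : Int × Int := (0, 0)
  let i : Int × Int :=
    if t = "" then i
    else
      -- t.index('/') raises ValueError when '/' is absent; Pre_ excludes that, so find = index here
      let n : Int := PySem.Str.find t "/" + 1
      let r : Int := PySem.Str.len t - n
      let i := (PySem.List.pyRange 0 r 1).foldl
        (fun (p : Int × Int) (e : Int) =>
          if PySem.Int.mod e 2 = 0 then
            (p.1 + ((PySem.List.pyGetD t.toList (e + n) ' ').toNat : Int), p.2)
          else
            (p.1, p.2 + ((PySem.List.pyGetD t.toList (e + n) ' ').toNat : Int))) i
      (PySem.Int.mod i.1 8, PySem.Int.mod i.2 8)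
  -- ctbl_d[i[1]] / ptbl_d[i[0]]: IndexError excluded by Pre_
  (PySem.List.pyGetD ctbl_d i.2 0, PySem.List.pyGetD ptbl_d i.1 0)

-- ===== PORT B =====
-- B: 'for c in reversed(part): even, odd = odd + ord(c), even' is a foldl over the reversed slice
-- with the swapping step; no parity test, no index arithmetic
def ctbl_ptbl_alt (t : String) (ctbl_d : List Int) (ptbl_d : List Int) : Int × Int :=
  let i : Int × Int :=
    if t = "" then (0, 0)
    else
      let part : List Char := PySem.List.slice t.toList (some (PySem.Str.find t "/" + 1)) none
      let q := part.reverse.foldl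
        (fun (p : Int × Int) (c : Char) => (p.2 + (c.toNat : Int), p.1)) (0, 0)
      (PySem.Int.mod q.1 8, PySem.Int.mod q.2 8)
  (PySem.List.pyGetD ctbl_d i.2 0, PySem.List.pyGetD ptbl_d i.1 0)

-- ===== PRECONDITION & SPEC =====
-- helpers for Pre_ only: the part after the first '/' and its (even-position, odd-position) code sums
def pvPart (t : String) : List Char := (t.toList.dropWhile (fun c => c ≠ '/')).drop 1
def pvSums : List Char → Int × Int
  | [] => (0, 0)
  | a :: l => ((pvSums l).2 + (a.toNat : Int), (pvSums l).1)

-- Pre_ = exactly the inputs where A returns: '/' present (else t.index('/') raises ValueError on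
-- nonempty t) and both derived indices inside the tables (else IndexError)
def Pre_ctbl_ptbl (t : String) (ctbl_d : List Int) (ptbl_d : List Int) : Prop :=
  (t = "" ∨ '/' ∈ t.toList) ∧
  (if t = "" then (0:Int) else PySem.Int.mod (pvSums (pvPart t)).2 8) < (ctbl_d.length : Int) ∧
  (if t = "" then (0:Int) else PySem.Int.mod (pvSums (pvPart t)).1 8) < (ptbl_d.length : Int)
instance (t : String) (ctbl_d : List Int) (ptbl_d : List Int) : Decidable (Pre_ctbl_ptbl t ctbl_d ptbl_d) := by unfold Pre_ctbl_ptbl; infer_instance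

def pvWitness_ctbl_ptbl : String × List Int × List Int :=
  ("pages/a.jpg", ([1, 2, 3, 4, 5, 6, 7, 8], [10, 20, 30, 40, 50, 60, 70, 80]))

def Spec_ctbl_ptbl (t : String) (ctbl_d : List Int) (ptbl_d : List Int) (out : Int × Int) : Prop := out = ctbl_ptbl_alt t ctbl_d ptbl_d
instance (t : String) (ctbl_d : List Int) (ptbl_d : List Int) (out : Int × Int) : Decidable (Spec_ctbl_ptbl t ctbl_d ptbl_d out) := by unfold Spec_ctbl_ptbl; infer_instance

-- ===== CLAIM (what is proved, stated in full; the proofs are below) =====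
def Claim_equal_ctbl_ptbl : Prop := ∀ (t : String) (ctbl_d : List Int) (ptbl_d : List Int), Dom_ctbl_ptbl t ctbl_d ptbl_d → Pre_ctbl_ptbl t ctbl_d ptbl_d → Spec_ctbl_ptbl t ctbl_d ptbl_d (ctbl_ptbl t ctbl_d ptbl_d)

-- ===== LEMMAS AND PROOFS =====

-- B's reversed swap-fold computes the (even-position, odd-position) code sums
theorem pvSwapFold_eq (l : List Char) :
    l.reverse.foldl (fun (p : Int × Int) (c : Char) => (p.2 + (c.toNat : Int), p.1)) (0, 0)
      = pvSums l := by
  rw [List.foldl_reverse]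
  induction l with
  | nil => simp [pvSums]
  | cons a rest ih => simp [pvSums, ih]

-- A's range loop over positions s, s+1, … of the suffix l of full starting at nI.toNat + s
theorem loopA (full : List Char) (nI : Int) (hn : 0 ≤ nI) (l : List Char) (s : Nat)
    (hd : full.drop (nI.toNat + s) = l) (acc : Int × Int) :
    ((PySem.List.pyRange (s : Int) ((s : Int) + (l.length : Int)) 1).foldl
      (fun (p : Int × Int) (e : Int) =>
        if PySem.Int.mod e 2 = 0 then
          (p.1 + ((PySem.List.pyGetD full (e + nI) ' ').toNat : Int), p.2)
        else
          (p.1, p.2 + ((PySem.List.pyGetD full (e + nI) ' ').toNat : Int))) acc)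
    = if s % 2 = 0 then (acc.1 + (pvSums l).1, acc.2 + (pvSums l).2)
      else (acc.1 + (pvSums l).2, acc.2 + (pvSums l).1) := by
  induction l generalizing s acc with
  | nil =>
      simp [pvSums]
  | cons a rest ih =>
      have hlt : (s : Int) < (s : Int) + ((a :: rest).length : Int) := by
        simp only [List.length_cons]
        push_cast
        omega
      rw [PySem.List.pyRange_one_cons hlt, List.foldl_cons]
      have hidx : (s : Int) + nI = ((nI.toNat + s : Nat) : Int) := by
        push_cast [Int.toNat_of_nonneg hn]; ring
      have hget : PySem.List.pyGetD full ((s : Int) + nI) ' ' = a := by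
        rw [hidx, PySem.List.pyGetD_natCast]
        have h0 : full[nI.toNat + s]? = some a := by
          have h1 := congrArg (fun l => l[0]?) hd
          simpa [List.getElem?_drop] using h1
        simp [List.getD_eq_getElem?_getD, h0]
      have hd' : full.drop (nI.toNat + (s + 1)) = rest := by
        have h2 := congrArg (List.drop 1) hd
        rw [List.drop_drop] at h2
        simpa [show 1 + (nI.toNat + s) = nI.toNat + (s + 1) by omega] using h2
      have hstart : ((s : Int) + 1) = ((s + 1 : Nat) : Int) := by push_cast; ring
      have hend : (s : Int) + ((a :: rest).length : Int) = ((s + 1 : Nat) : Int) + (rest.length : Int) := by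
        push_cast [List.length_cons]; ring
      have hmod : PySem.Int.mod (s : Int) 2 = ((s % 2 : Nat) : Int) := by
        exact_mod_cast PySem.Int.mod_natCast s 2
      rcases Nat.even_or_odd s with he | ho
      · have hs0 : s % 2 = 0 := Nat.even_iff.mp he
        have hs1 : (s + 1) % 2 = 1 := by omega
        rw [hget, hmod, hs0, if_pos rfl, Nat.cast_zero, if_pos rfl, hstart, hend,
          ih (s + 1) hd' _, if_neg (by omega)]
        simp only [pvSums]
        exact Prod.ext (by ring) (by ring)
      · have hs0 : s % 2 = 1 := Nat.odd_iff.mp ho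
        have hs1 : (s + 1) % 2 = 0 := by omega
        rw [hget, hmod, hs0, if_neg (show ¬(((1 : Nat) : Int) = 0) by omega)]
        rw [if_neg (show ¬(1 = 0) by omega)]
        rw [hstart, hend, ih (s + 1) hd' _, if_pos hs1]
        simp only [pvSums]
        exact Prod.ext (by ring) (by ring)

-- ===== VERDICT (by name: the statement is the Claim_ definition above) =====
theorem ctbl_ptbl_spec : Claim_equal_ctbl_ptbl := by
  intro t ctbl_d ptbl_d _ hpre
  unfold Spec_ctbl_ptbl
  by_cases ht : t = ""
  · simp [ctbl_ptbl, ctbl_ptbl_alt, ht]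
  · have hmem : '/' ∈ t.toList := hpre.1.resolve_left ht
    have hinf : (['/'] : List Char) <:+: t.toList := by
      obtain ⟨l1, l2, hsplit⟩ := List.append_of_mem hmem
      exact ⟨l1, l2, by rw [hsplit]; simp⟩
    have hslash : ("/" : String).toList = ['/'] := rfl
    have hf0 : 0 ≤ PySem.Chars.find t.toList ['/'] :=
      (PySem.Chars.find_nonneg_iff _ _).mpr hinf
    have hfpre := (PySem.Chars.find_spec (s := t.toList) (sub := ['/']) hf0).1
    have hflen : (PySem.Chars.find t.toList ['/']).toNat < t.toList.length := by
      by_contra hge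
      rw [List.drop_eq_nil_of_le (by omega)] at hfpre
      exact (by simpa using hfpre.length_le)
    set f : Int := PySem.Chars.find t.toList ['/'] with hfdef
    set part : List Char := t.toList.drop (f + 1).toNat with hpart
    have hd0 : t.toList.drop ((f + 1).toNat + 0) = part := by rw [Nat.add_zero]
    have hloop := loopA t.toList (f + 1) (by omega) part 0 hd0 (0, 0)
    have hswap := pvSwapFold_eq part
    simp only [Nat.cast_zero, zero_add, Nat.zero_mod, reduceIte] at hloop
    have hslice : PySem.List.slice t.toList (some (f + 1)) none = part := by
      rw [PySem.List.slice_from _ (show (0 : Int) ≤ f + 1 by omega)]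
    simp only [ctbl_ptbl, ctbl_ptbl_alt, if_neg ht, PySem.Str.find_eq, PySem.Str.len_eq,
      hslash, ← hfdef]
    rw [hslice,
      show ((t.toList.length : Int) - (f + 1)) = (part.length : Int) from by
        rw [hpart, List.length_drop]; omega,
      hloop, hswap]
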